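-- pv_equiv track=rewrite | github.com/rbarboni/kikuchi_matrices | matrix_concentration.py | k_crossings
-- ===== SOURCE A (Python) =====
-- def cross(pair0, pair1):
--     return ((pair0[0] - pair1[0]) * (pair0[1] - pair1[1]) > 0) and ((pair0[1] - pair1[0]) * (pair0[0] - pair1[1]) < 0)
--
-- def k_crossings(k, pairing):
--     if len(pairing) < k:
--         return []
--     if k == 1:
--         return [[pair] for pair in pairing]
--     res = []
--     pair0 = pairing[0]
--     crossings_list = k_crossings(k-1, pairing[1:])
--     for crossing in crossings_list:
--         cond = True
--         for pair in crossing: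
--             if not cross(pair0, pair):
--                 cond = False
--         if cond:
--             res.append([pair0]+crossing)
--     for crossing in k_crossings(k, pairing[1:]):
--         res.append(crossing)
--     return res
-- ===== SOURCE B (Python) =====
-- def cross(pair0, pair1):
--     return ((pair0[0] - pair1[0]) * (pair0[1] - pair1[1]) > 0) and ((pair0[1] - pair1[0]) * (pair0[0] - pair1[1]) < 0)
--
--
-- def combos(k, lst):
--     # all k-element combinations of lst, in index-lexicographic order
--     if k == 0:
--         return [[]]
--     res = []
--     for i in range(len(lst)):
--         for rest in combos(k - 1, lst[i + 1:]):
--             res.append([lst[i]] + rest)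
--     return res
--
--
-- def mutually_crossing(c):
--     if not c:
--         return True
--     return all(cross(c[0], q) for q in c[1:]) and mutually_crossing(c[1:])
--
--
-- def k_crossings(k, pairing):
--     if len(pairing) < k:
--         return []
--     return [c for c in combos(k, pairing) if mutually_crossing(c)]
-- ===== Notes on version B (the rewrite author's own statement) =====
-- stated objective: simpler
-- what changed: Replaced A's include/exclude recursion with interleaved crossing checks by a generate-then-filter decomposition: a combinations generator looping over the index of the first chosen pair, followed by a separate recursive mutually-crossing filter.
-- crash fix: For k <= 0 A always ends in an IndexError on pairing[0] of an empty (suffix) list, while B returns [[]] for k == 0 and [] for k < 0. — e.g. on k_crossings(0, []): A raises IndexError, B returns [[]]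
import Mathlib
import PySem

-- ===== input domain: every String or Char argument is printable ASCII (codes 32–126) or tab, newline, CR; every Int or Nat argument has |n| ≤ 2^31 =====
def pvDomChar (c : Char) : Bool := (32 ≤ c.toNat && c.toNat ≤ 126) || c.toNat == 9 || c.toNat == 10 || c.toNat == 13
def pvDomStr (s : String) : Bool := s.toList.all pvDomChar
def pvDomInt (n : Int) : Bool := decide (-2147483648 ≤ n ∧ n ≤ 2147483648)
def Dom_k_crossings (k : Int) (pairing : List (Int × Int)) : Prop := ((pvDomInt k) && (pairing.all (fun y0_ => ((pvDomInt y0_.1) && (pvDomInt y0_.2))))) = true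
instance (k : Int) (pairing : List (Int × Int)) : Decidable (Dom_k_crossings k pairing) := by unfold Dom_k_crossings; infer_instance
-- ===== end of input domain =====

-- B replaces A's include/exclude recursion (filtering while building) by a separate
-- combinations generator plus a mutually-crossing filter; objective: simpler decomposition.

-- ===== PORT A =====
-- shared helper `cross` (A and B use the identical Python function)
def cross (pair0 pair1 : Int × Int) : Bool :=
  ((pair0.1 - pair1.1) * (pair0.2 - pair1.2) > 0) && ((pair0.2 - pair1.1) * (pair0.1 - pair1.2) < 0)

def k_crossings (k : Int) (pairing : List (Int × Int)) : List (List (Int × Int)) :=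
  if (pairing.length : Int) < k then []
  else if k = 1 then pairing.map (fun pair => [pair])
  else
    match pairing with
    | [] => []  -- Python raises IndexError at pairing[0] here; reachable only outside Pre_
    | pair0 :: tl =>
      let res := (k_crossings (k - 1) tl).foldl (fun res crossing =>
        let cond := crossing.foldl (fun cond pair => if !(cross pair0 pair) then false else cond) true
        if cond then res ++ [pair0 :: crossing] else res) []
      (k_crossings k tl).foldl (fun res crossing => res ++ [crossing]) res

-- ===== PORT B =====
-- `for i in range(len(lst)): for rest in combos(k-1, lst[i+1:]): res.append([lst[i]] + rest)`
-- (attach only carries i < len for termination; lst[i]! = Python's lst[i] for i in range)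
def combosB (k : Int) (lst : List (Int × Int)) : List (List (Int × Int)) :=
  if k = 0 then [[]]
  else (List.range lst.length).attach.flatMap (fun i =>
    (combosB (k - 1) (lst.drop (i.1 + 1))).map (fun rest => lst[i.1]! :: rest))
termination_by lst.length
decreasing_by
  have := List.mem_range.mp i.2
  simp only [List.length_drop]; omega

def mutuallyCrossing : List (Int × Int) → Bool
  | [] => true
  | c0 :: rest => rest.all (fun q => cross c0 q) && mutuallyCrossing rest

def k_crossings_alt (k : Int) (pairing : List (Int × Int)) : List (List (Int × Int)) :=
  if (pairing.length : Int) < k then []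
  else (combosB k pairing).filter mutuallyCrossing

-- ===== PRECONDITION & SPEC =====
-- Pre_ excludes exactly k ≤ 0, where Python's A always ends in an IndexError
def Pre_k_crossings (k : Int) (pairing : List (Int × Int)) : Prop := 1 ≤ k
instance (k : Int) (pairing : List (Int × Int)) : Decidable (Pre_k_crossings k pairing) := by unfold Pre_k_crossings; infer_instance
def pvWitness_k_crossings : Int × (List (Int × Int)) := (2, [(0, 2), (1, 3)])

-- For k ≤ 0 A always raises IndexError on pairing[0] of an empty (suffix) list; B returns [[]] for
-- k = 0 and [] for k < 0 (checked by theorem k_crossings_raises at the bottom of the file).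
def Raises_k_crossings (k : Int) (pairing : List (Int × Int)) : Prop := k ≤ 0
instance (k : Int) (pairing : List (Int × Int)) : Decidable (Raises_k_crossings k pairing) := by unfold Raises_k_crossings; infer_instance
def pvRaiseWitness_k_crossings : Int × (List (Int × Int)) := (0, [])
def pvRaiseWitnessOut_k_crossings : List (List (Int × Int)) := [[]]

def Spec_k_crossings (k : Int) (pairing : List (Int × Int)) (out : List (List (Int × Int))) : Prop := out = k_crossings_alt k pairing
instance (k : Int) (pairing : List (Int × Int)) (out : List (List (Int × Int))) : Decidable (Spec_k_crossings k pairing out) := by unfold Spec_k_crossings; infer_instance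

-- ===== CLAIM (what is proved, stated in full; the proofs are below) =====
def Claim_equal_k_crossings : Prop := ∀ (k : Int) (pairing : List (Int × Int)), Dom_k_crossings k pairing → Pre_k_crossings k pairing → Spec_k_crossings k pairing (k_crossings k pairing)
def Claim_raises_k_crossings : Prop := (∀ (k : Int) (pairing : List (Int × Int)), Dom_k_crossings k pairing → Raises_k_crossings k pairing → ¬ Pre_k_crossings k pairing) ∧ (Dom_k_crossings (pvRaiseWitness_k_crossings.1) (pvRaiseWitness_k_crossings.2) ∧ Raises_k_crossings (pvRaiseWitness_k_crossings.1) (pvRaiseWitness_k_crossings.2) ∧ k_crossings_alt (pvRaiseWitness_k_crossings.1) (pvRaiseWitness_k_crossings.2) = pvRaiseWitnessOut_k_crossings)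

-- ===== LEMMAS AND PROOFS =====

theorem combosB_eq (k : Int) (lst : List (Int × Int)) (hk : k ≠ 0) :
    combosB k lst = (List.range lst.length).flatMap (fun i =>
      (combosB (k - 1) (lst.drop (i + 1))).map (fun rest => lst[i]! :: rest)) := by
  rw [combosB, if_neg hk]
  conv_rhs => rw [← List.attach_map_subtype_val (List.range lst.length)]
  rw [List.flatMap_map]

theorem combosB_zero (lst : List (Int × Int)) : combosB 0 lst = [[]] := by
  rw [combosB]; rfl

theorem combosB_cons (k : Int) (hk : k ≠ 0) (a : Int × Int) (t : List (Int × Int)) :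
    combosB k (a :: t) = (combosB (k - 1) t).map (fun c => a :: c) ++ combosB k t := by
  rw [combosB_eq k _ hk, combosB_eq k t hk]
  simp only [List.length_cons, List.range_succ_eq_map, List.flatMap_cons, List.flatMap_map]
  simp [List.drop_succ_cons, Nat.succ_eq_add_one]

theorem combosB_one (p : List (Int × Int)) : combosB 1 p = p.map (fun x => [x]) := by
  induction p with
  | nil => rw [combosB_eq 1 [] one_ne_zero]; rfl
  | cons a t ih =>
    rw [combosB_cons 1 one_ne_zero a t]
    norm_num [combosB_zero, ih]

theorem combosB_nil_big (k : Int) (p : List (Int × Int)) (hk : 1 ≤ k)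
    (h : (p.length : Int) < k) : combosB k p = [] := by
  induction p generalizing k with
  | nil => rw [combosB_eq k [] (by omega)]; rfl
  | cons a t ih =>
    simp only [List.length_cons] at h
    rw [combosB_cons k (by omega) a t]
    rw [ih (k - 1) (by push_cast at h ⊢; omega) (by push_cast at h ⊢; omega)]
    rw [ih k hk (by push_cast at h ⊢; omega)]
    rfl

theorem mc_singleton (x : Int × Int) : mutuallyCrossing [x] = true := by
  simp [mutuallyCrossing]

theorem condFold (p0 : Int × Int) (c : List (Int × Int)) (b : Bool) :
    c.foldl (fun cond pair => if !(cross p0 pair) then false else cond) b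
      = (b && c.all (fun q => cross p0 q)) := by
  induction c generalizing b with
  | nil => simp
  | cons x t ih =>
    simp only [List.foldl_cons, List.all_cons, ih]
    cases hx : cross p0 x <;> simp

theorem foldl_app (l : List (List (Int × Int))) (acc : List (List (Int × Int))) :
    l.foldl (fun res crossing => res ++ [crossing]) acc = acc ++ l := by
  induction l generalizing acc with
  | nil => simp
  | cons x t ih => simp [ih]

theorem foldl_fun_eq (p0 : Int × Int) :
    (fun (res : List (List (Int × Int))) crossing =>
        let cond := crossing.foldl (fun cond pair => if !(cross p0 pair) then false else cond) true
        if cond then res ++ [p0 :: crossing] else res)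
      = (fun res crossing =>
          if crossing.all (fun q => cross p0 q) then res ++ [p0 :: crossing] else res) := by
  funext res crossing
  rw [condFold, Bool.true_and]

theorem foldl_filtmap (p0 : Int × Int) (l : List (List (Int × Int)))
    (acc : List (List (Int × Int))) :
    l.foldl (fun res crossing =>
        if crossing.all (fun q => cross p0 q) then res ++ [p0 :: crossing] else res) acc
      = acc ++ (l.filter (fun c => c.all (fun q => cross p0 q))).map (fun c => p0 :: c) := by
  induction l generalizing acc with
  | nil => simp
  | cons x t ih =>
    simp only [List.foldl_cons, List.filter_cons]
    cases hx : x.all (fun q => cross p0 q) <;> simp [ih]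

theorem main_lemma (p : List (Int × Int)) (k : Int) (hk : 1 ≤ k) :
    k_crossings k p = (combosB k p).filter mutuallyCrossing := by
  induction p generalizing k with
  | nil =>
    rw [k_crossings, if_pos (by simpa using hk), combosB_nil_big k [] hk (by simpa using hk)]
    rfl
  | cons a t ih =>
    by_cases h1 : (((a :: t).length : Int) < k)
    · rw [k_crossings, if_pos h1, combosB_nil_big k _ hk h1]; rfl
    · by_cases h2 : k = 1
      · subst h2
        rw [k_crossings, if_neg h1, if_pos rfl, combosB_one, List.filter_map]
        have : (mutuallyCrossing ∘ fun x => [x]) = fun _ => true := by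
          funext x; simp [mc_singleton]
        rw [this, List.filter_true]
      · rw [k_crossings, if_neg h1, if_neg h2]
        rw [foldl_fun_eq, foldl_filtmap, foldl_app, List.nil_append]
        have hk1 : (1:Int) ≤ k - 1 := by omega
        rw [ih (k - 1) hk1, ih k hk, combosB_cons k (by omega) a t, List.filter_append,
          List.filter_map]
        congr 1
        rw [List.filter_filter]
        rfl

-- ===== VERDICT (by name: the statement is the Claim_ definition above) =====
theorem k_crossings_spec : Claim_equal_k_crossings := by
  intro k pairing _ hpre
  unfold Spec_k_crossings k_crossings_alt
  split
  · rename_i h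
    rw [main_lemma pairing k hpre, combosB_nil_big k pairing hpre h]
    rfl
  · exact main_lemma pairing k hpre

@[simp] theorem k_crossings_raises : Claim_raises_k_crossings := by
  unfold Claim_raises_k_crossings
  refine ⟨fun k p _ hr hp => by unfold Raises_k_crossings at hr; unfold Pre_k_crossings at hp; omega, by decide, by decide, ?_⟩
  show k_crossings_alt 0 [] = [[]]
  rw [k_crossings_alt, if_neg (by norm_num), combosB_zero]
  rfl
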